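-- pv_equiv track=rewrite | github.com/RedGhoul/AlgoCast | Old/Anything/fallingDominoes.py | fallingDominoes
-- ===== SOURCE A (Python) =====
-- import math
--
-- def fallingDominoes(d):
--     """
--     In this solution you are building out the answer as you go along
--     in a single pass
--
--     Works by looking at the regions in between the Rs and Ls
--     and creating a window using two pointers that incompasses them
--     then sets the first one to the second one and processed to
--     continuly move the second one from where it was to another R or L
--
--
--     The L would never effect the front of it
--     The R would never effect the back of it
--     """
--     d = list('L' + d + 'R')
--     res = []
--     i = 0
--     for j in range(1, len(d)):
--         if d[j] == '.':
--             continue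
--         # middle is the space between them
--         middle = j - i - 1 # we subtract one here since we want to account for the extra L
--
--         if i != 0: # but don't add the first one
--             # to keep adding to the answer your building
--             # it could be an L or a R
--             res.append(d[i])
--
--         if d[i] == d[j]:
--             # if they are both equal then you know that
--             # they will need to be same in between
--             res.append(d[i] * middle)
--         elif d[i] == 'L' and d[j] == 'R':
--             # if one L and another R then they will never touch
--             res.append('.' * middle)
--         else:
--             """
--             this is for the other case of R and L
--             if its odd then we have to have a single "."
--             if its even then we have to fill from both sides of L and R
--             if middle is even that mean module 2 is zero which cancels out "."
--
--             rounding up = ceil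
--             rounding down = floor
--             general round off to the nearest whole number = round
--             """
--             res.append('R' * math.floor(middle / 2) + '.' * (middle % 2) + 'L' * math.floor(middle / 2))
--         # then we reset the pointer to its new place
--         i = j
--
--     return ''.join(res)
-- ===== SOURCE B (Python) =====
-- def fallingDominoes(d):
--     # Nearest-boundary variant: one sweep records, for every cell, the nearest
--     # non-'.' character to its left (with the 'L' wall) and its distance; a
--     # reverse sweep does the same to the right (with the 'R' wall); each cell is
--     # then decided independently from its two neighbouring boundaries.
--     n = len(d)
--     lp = []
--     p, a = 'L', 0
--     for ch in d:
--         if ch != '.':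
--             p, a = ch, 0
--         else:
--             a += 1
--         lp.append((p, a))
--     rp = []
--     c, b = 'R', 0
--     for ch in reversed(d):
--         if ch != '.':
--             c, b = ch, 0
--         else:
--             b += 1
--         rp.append((c, b))
--     rp.reverse()
--     out = []
--     for k in range(n):
--         p, a = lp[k]
--         c, b = rp[k]
--         if a == 0:
--             out.append(p)  # the cell itself is a boundary
--         elif p == c:
--             out.append(p)
--         elif p == 'L' and c == 'R':
--             out.append('.')
--         else:
--             m = a + b - 1
--             half = m // 2
--             out.append('R' if a <= half else ('L' if a > m - half else '.'))
--     return ''.join(out)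
-- ===== Notes on version B (the rewrite author's own statement) =====
-- stated objective: alternative
-- what changed: Replaces A's sentinel two-pointer pass that emits each inter-boundary window as a filled segment by two nearest-boundary sweeps (last non-dot char and distance on each side of every cell) followed by an independent per-cell decision.
import Mathlib
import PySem

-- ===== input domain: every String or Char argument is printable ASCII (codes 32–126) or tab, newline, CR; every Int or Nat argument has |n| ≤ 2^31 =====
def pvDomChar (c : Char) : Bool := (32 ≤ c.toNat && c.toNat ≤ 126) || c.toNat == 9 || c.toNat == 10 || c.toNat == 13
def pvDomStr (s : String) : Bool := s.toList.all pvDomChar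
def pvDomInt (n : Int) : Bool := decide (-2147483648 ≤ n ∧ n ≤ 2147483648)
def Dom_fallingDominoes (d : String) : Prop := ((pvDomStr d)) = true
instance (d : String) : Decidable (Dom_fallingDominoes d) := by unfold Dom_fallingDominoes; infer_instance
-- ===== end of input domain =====

-- B replaces A's sentinel + two-pointer segment filling by two nearest-boundary sweeps
-- and an independent per-cell decision (objective: alternative decomposition, same cost).

-- ===== PORT A =====
-- one loop iteration of A: j is the running index into l = list('L' + d + 'R'),
-- state = (i, res) with i the left pointer and res the accumulated pieces
def fdStepA (l : List Char) (st : Int × List (List Char)) (j : Int) : Int × List (List Char) :=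
  if PySem.List.pyGetD l j ' ' = '.' then st
  else
    let i := st.1
    let middle : Int := j - i - 1
    let di := PySem.List.pyGetD l i ' '
    let res := if i ≠ 0 then st.2 ++ [[di]] else st.2
    let res :=
      if di = PySem.List.pyGetD l j ' ' then
        res ++ [List.replicate middle.toNat di]
      else if di = 'L' ∧ PySem.List.pyGetD l j ' ' = 'R' then
        res ++ [List.replicate middle.toNat '.']
      else
        res ++ [List.replicate (PySem.Int.floordiv middle 2).toNat 'R' ++
                List.replicate (PySem.Int.mod middle 2).toNat '.' ++
                List.replicate (PySem.Int.floordiv middle 2).toNat 'L']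
    (j, res)

def fallingDominoes (d : String) : String :=
  let l : List Char := 'L' :: d.toList ++ ['R']
  let r := List.foldl (fdStepA l) (0, []) (PySem.List.pyRange 1 (l.length : Int) 1)
  String.ofList (PySem.Chars.join [] r.2)

-- ===== PORT B =====
def fallingDominoes_alt (d : String) : String :=
  let n : Int := (d.toList.length : Int)
  let lp := (d.toList.foldl (fun (st : (Char × Int) × List (Char × Int)) ch =>
      let pa := if ch ≠ '.' then (ch, (0 : Int)) else (st.1.1, st.1.2 + 1)
      (pa, st.2 ++ [pa])) (('L', 0), [])).2
  let rp := (d.toList.reverse.foldl (fun (st : (Char × Int) × List (Char × Int)) ch =>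
      let cb := if ch ≠ '.' then (ch, (0 : Int)) else (st.1.1, st.1.2 + 1)
      (cb, st.2 ++ [cb])) (('R', 0), [])).2
  let rp := rp.reverse
  let out := (PySem.List.pyRange 0 n 1).foldl (fun (acc : List Char) k =>
      let pa := PySem.List.pyGetD lp k ('.', 0)
      let cb := PySem.List.pyGetD rp k ('.', 0)
      acc ++ [if pa.2 = 0 then pa.1
        else if pa.1 = cb.1 then pa.1
        else if pa.1 = 'L' ∧ cb.1 = 'R' then '.'
        else
          let m := pa.2 + cb.2 - 1
          let half := PySem.Int.floordiv m 2
          if pa.2 ≤ half then 'R' else if m - half < pa.2 then 'L' else '.']) []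
  String.ofList out

-- ===== PRECONDITION & SPEC =====
def Spec_fallingDominoes (d : String) (out : String) : Prop := out = fallingDominoes_alt d
instance (d : String) (out : String) : Decidable (Spec_fallingDominoes d out) := by unfold Spec_fallingDominoes; infer_instance

-- ===== CLAIM (what is proved, stated in full; the proofs are below) =====
def Claim_equal_fallingDominoes : Prop := ∀ (d : String), Dom_fallingDominoes d → Spec_fallingDominoes d (fallingDominoes d)

-- ===== LEMMAS AND PROOFS =====

-- per-segment fill emitted by A between boundaries p and c with m dots in between
def fdFill (p c : Char) (m : ℕ) : List Char :=
  if p = c then List.replicate m p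
  else if p = 'L' ∧ c = 'R' then List.replicate m '.'
  else List.replicate (m / 2) 'R' ++ List.replicate (m % 2) '.' ++ List.replicate (m / 2) 'L'

-- A's loop as a recursion over the remaining characters (pieces form; `first` = pointer still at 0)
def fdSegA : Char → Bool → ℕ → List Char → List (List Char)
  | _, _, _, [] => []
  | p, first, m, c :: ys =>
    if c = '.' then fdSegA p first (m + 1) ys
    else (if first then [] else [[p]]) ++ [fdFill p c m] ++ fdSegA c false 0 ys

-- same output, flattened, with the boundary char emitted eagerly
def fdSegOut : Char → ℕ → List Char → List Char
  | _, _, [] => []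
  | p, m, c :: ys =>
    if c = '.' then fdSegOut p (m + 1) ys
    else fdFill p c m ++ (if ys.isEmpty then [] else [c]) ++ fdSegOut c 0 ys

theorem fdGetLastD_cons {α : Type} : ∀ (l : List α) (a d : α), (a :: l).getLast?.getD d = l.getLast?.getD a := by
  intro l; induction l with
  | nil => intro a d; rfl
  | cons b l ih => intro a d; rw [List.getLast?_cons_cons, ih b d, ih b a]

theorem fdFloordiv2_natCast (a : ℕ) : PySem.Int.floordiv (a : Int) 2 = ((a / 2 : ℕ) : Int) := by
  exact_mod_cast PySem.Int.floordiv_natCast a 2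

theorem fdMod2_natCast (a : ℕ) : PySem.Int.mod (a : Int) 2 = ((a % 2 : ℕ) : Int) := by
  exact_mod_cast PySem.Int.mod_natCast a 2

-- B's directional sweep, generic in the per-character state update
def fdScanG {σ : Type} (g : σ → Char → σ) : σ → List Char → List σ
  | _, [] => []
  | st, c :: cs => g st c :: fdScanG g (g st c) cs

-- B's state update: remember the last boundary character and the distance to it
def fdStep (st : Char × Int) (ch : Char) : Char × Int :=
  if ch ≠ '.' then (ch, 0) else (st.1, st.2 + 1)

-- B's per-cell decision from the two neighbouring boundaries
def fdCell (pa cb : Char × Int) : Char :=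
  if pa.2 = 0 then pa.1
  else if pa.1 = cb.1 then pa.1
  else if pa.1 = 'L' ∧ cb.1 = 'R' then '.'
  else
    let m := pa.2 + cb.2 - 1
    let half := PySem.Int.floordiv m 2
    if pa.2 ≤ half then 'R' else if m - half < pa.2 then 'L' else '.'

theorem fdScanG_length {σ : Type} (g : σ → Char → σ) : ∀ (cs : List Char) (f : σ), (fdScanG g f cs).length = cs.length := by
  intro cs; induction cs with
  | nil => intro f; rfl
  | cons c cs ih => intro f; simp [fdScanG, ih]

theorem fdScanG_append {σ : Type} (g : σ → Char → σ) : ∀ (a b : List Char) (f : σ),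
    fdScanG g f (a ++ b) = fdScanG g f a ++ fdScanG g ((fdScanG g f a).getLastD f) b := by
  intro a; induction a with
  | nil => intro b f; rfl
  | cons c cs ih => intro b f; simp [fdScanG, ih, fdGetLastD_cons]

theorem fdScanG_foldl {σ : Type} (g : σ → Char → σ) : ∀ (cs : List Char) (f : σ) (acc : List σ),
    cs.foldl (fun (st : σ × List σ) c => (g st.1 c, st.2 ++ [g st.1 c])) (f, acc)
      = ((fdScanG g f cs).getLastD f, acc ++ fdScanG g f cs) := by
  intro cs; induction cs with
  | nil => intro f acc; simp [fdScanG]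
  | cons c cs ih => intro f acc; simp [List.foldl_cons, fdScanG, ih, fdGetLastD_cons]

theorem fdFoldl_append_map {α β : Type} (g : α → β) : ∀ (xs : List α) (acc : List β),
    xs.foldl (fun a j => a ++ [g j]) acc = acc ++ xs.map g := by
  intro xs; induction xs with
  | nil => intro acc; simp
  | cons x xs ih => intro acc; simp [List.foldl_cons, ih]

theorem fdZipWith_map_same {α β γ δ : Type} (h : β → γ → δ) (f : α → β) (g : α → γ) :
    ∀ l : List α, List.zipWith h (l.map f) (l.map g) = l.map (fun x => h (f x) (g x)) := by
  intro l; induction l with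
  | nil => rfl
  | cons x l ih => simp [ih]

theorem fdMap_range_reverse {α : Type} (g : ℕ → α) (m : ℕ) :
    ((List.range m).map g).reverse = (List.range m).map (fun t => g (m - 1 - t)) := by
  apply List.ext_getElem
  · simp
  · intro k h1 h2
    simp only [List.getElem_reverse, List.getElem_map, List.getElem_range, List.length_map,
      List.length_range] at h1 h2 ⊢

theorem fdScan_rep : ∀ (m : ℕ) (p : Char) (a0 : Int),
    fdScanG fdStep (p, a0) (List.replicate m '.') = (List.range m).map (fun t : ℕ => (p, a0 + (t : Int) + 1)) := by
  intro m
  induction m with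
  | zero => intro p a0; rfl
  | succ m ih =>
    intro p a0
    have h1 : fdScanG fdStep (p, a0) (List.replicate (m + 1) '.')
        = (p, a0 + 1) :: fdScanG fdStep (p, a0 + 1) (List.replicate m '.') := by
      rw [List.replicate_succ]; simp [fdScanG, fdStep]
    rw [h1, ih, List.range_succ_eq_map, List.map_cons, List.map_map]
    refine List.cons_eq_cons.mpr ⟨by norm_num, List.map_congr_left ?_⟩
    intro t _
    simp only [Function.comp_apply, Prod.mk.injEq, true_and]
    push_cast
    ring

theorem fdScan_rep0 (m : ℕ) (p : Char) :
    fdScanG fdStep (p, 0) (List.replicate m '.') = (List.range m).map (fun t : ℕ => (p, (t : Int) + 1)) := by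
  rw [fdScan_rep]
  apply List.map_congr_left
  intro t _
  simp

theorem fdScan_rep_rev (m : ℕ) (c : Char) :
    (fdScanG fdStep (c, 0) (List.replicate m '.')).reverse
      = (List.range m).map (fun t : ℕ => (c, (m : Int) - t)) := by
  rw [fdScan_rep0, fdMap_range_reverse]
  apply List.map_congr_left
  intro t ht
  have ht' : t < m := List.mem_range.mp ht
  simp only [Prod.mk.injEq, true_and]
  omega

theorem fdSegOut_replicate : ∀ (m : ℕ) (p : Char) (k : ℕ) (ys : List Char),
    fdSegOut p k (List.replicate m '.' ++ ys) = fdSegOut p (k + m) ys := by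
  intro m; induction m with
  | zero => intro p k ys; simp
  | succ m ih =>
    intro p k ys
    rw [List.replicate_succ]
    have e1 : fdSegOut p k ('.' :: (List.replicate m '.' ++ ys)) = fdSegOut p (k + 1) (List.replicate m '.' ++ ys) := by
      simp [fdSegOut]
    rw [List.cons_append, e1, ih]
    have h : k + 1 + m = k + (m + 1) := by omega
    rw [h]

theorem fdGetLast?_cons_ne {α : Type} (a : α) (l : List α) (h : l ≠ []) : (a :: l).getLast? = l.getLast? := by
  obtain ⟨y, ys, rfl⟩ := List.exists_cons_of_ne_nil h
  exact List.getLast?_cons_cons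

theorem fdSegA_flatten : ∀ (ys : List Char) (p : Char) (first : Bool) (m : ℕ),
    ys.getLast? ≠ some '.' →
    (fdSegA p first m ys).flatten = (if first then [] else if ys.isEmpty then [] else [p]) ++ fdSegOut p m ys := by
  intro ys; induction ys with
  | nil => intro p first m _; cases first <;> simp [fdSegA, fdSegOut]
  | cons c ys ih =>
    intro p first m hlast
    by_cases hc : c = '.'
    · subst hc
      have hys : ys ≠ [] := by
        intro h; subst h; simp at hlast
      have hlast' : ys.getLast? ≠ some '.' := by
        rwa [fdGetLast?_cons_ne _ _ hys] at hlast
      have e1 : fdSegA p first m ('.' :: ys) = fdSegA p first (m + 1) ys := by simp [fdSegA]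
      have e2 : fdSegOut p m ('.' :: ys) = fdSegOut p (m + 1) ys := by simp [fdSegOut]
      have h3 : ys.isEmpty = false := by simp [hys]
      rw [e1, e2, ih _ first _ hlast', h3]
      rfl
    · have e1 : fdSegA p first m (c :: ys) = (if first then [] else [[p]]) ++ [fdFill p c m] ++ fdSegA c false 0 ys := by
        simp [fdSegA, hc]
      have e2 : fdSegOut p m (c :: ys) = fdFill p c m ++ (if ys.isEmpty then [] else [c]) ++ fdSegOut c 0 ys := by
        simp [fdSegOut, hc]
      rw [e1, e2]
      by_cases hys : ys = []
      · subst hys; cases first <;> simp [fdSegA, fdSegOut]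
      · have hlast' : ys.getLast? ≠ some '.' := by
          rwa [fdGetLast?_cons_ne _ _ hys] at hlast
        have h3 : ys.isEmpty = false := by simp [hys]
        rw [List.flatten_append, List.flatten_append, ih _ false _ hlast', h3]
        cases first <;> simp

theorem fdCell_fill (p c : Char) (m : ℕ) (hpc' : p ≠ '.') :
    List.zipWith fdCell ((List.range m).map (fun t : ℕ => (p, (t : Int) + 1)))
        ((List.range m).map (fun t : ℕ => (c, (m : Int) - t))) = fdFill p c m := by
  rw [fdZipWith_map_same]
  by_cases hpc : p = c
  · subst hpc
    rw [show fdFill p p m = List.replicate m p from by simp [fdFill]]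
    rw [List.eq_replicate_iff]
    refine ⟨by simp, ?_⟩
    intro b hb
    obtain ⟨t, ht, rfl⟩ := List.mem_map.mp hb
    simp only [fdCell]
    split_ifs <;> rfl
  · by_cases hLR : p = 'L' ∧ c = 'R'
    · obtain ⟨rfl, rfl⟩ := hLR
      rw [show fdFill 'L' 'R' m = List.replicate m '.' from by simp [fdFill]]
      rw [List.eq_replicate_iff]
      refine ⟨by simp, ?_⟩
      intro b hb
      obtain ⟨t, ht, rfl⟩ := List.mem_map.mp hb
      simp only [fdCell]
      split_ifs <;> first | rfl | (exfalso; omega) | (exfalso; tauto)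
    · rw [show fdFill p c m
          = List.replicate (m / 2) 'R' ++ List.replicate (m % 2) '.' ++ List.replicate (m / 2) 'L' from by
        simp [fdFill, hpc, hLR]]
      apply List.ext_getElem
      · simp
        omega
      · intro k h1 h2
        simp only [List.length_map, List.length_range] at h1
        have hm : ((k : Int) + 1) + ((m : Int) - k) - 1 = ((m : ℕ) : Int) := by ring
        simp only [List.getElem_map, List.getElem_range, fdCell, hm, fdFloordiv2_natCast,
          List.getElem_append, List.length_append, List.length_replicate, List.getElem_replicate]
        split_ifs <;> first | rfl | (exfalso; omega)

theorem fdZip_map {α β γ : Type} (h : α → β → γ) (dfa : α) (dfb : β) (F : List α) (G : List β)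
    (nn : ℕ) (hF : F.length = nn) (hG : G.length = nn) :
    (PySem.List.pyRange 0 (nn : Int) 1).map
        (fun i => h (PySem.List.pyGetD F i dfa) (PySem.List.pyGetD G i dfb)) = List.zipWith h F G := by
  subst hF
  rw [PySem.List.pyRange_zero_nat, List.map_map]
  apply List.ext_getElem
  · simp [hG]
  · intro k h1 h2
    simp only [List.getElem_map, List.getElem_range, Function.comp_apply, List.length_map,
      List.length_range] at h1 ⊢
    rw [List.getElem_zipWith]
    rw [PySem.List.pyGetD_natCast, PySem.List.pyGetD_natCast,
      List.getD_eq_getElem F dfa (by omega), List.getD_eq_getElem G dfb (by omega)]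

theorem fdDropWhile_head (q : Char → Bool) : ∀ (l : List Char) (c : Char) (r : List Char),
    l.dropWhile q = c :: r → q c = false := by
  intro l; induction l with
  | nil => intro c r h; simp [List.dropWhile] at h
  | cons a l ih =>
    intro c r h
    rw [List.dropWhile_cons] at h
    by_cases ha : q a = true
    · rw [if_pos ha] at h; exact ih c r h
    · rw [if_neg ha] at h
      obtain ⟨rfl, -⟩ := List.cons_eq_cons.mp h
      simpa using ha

theorem fdA_fold (l : List Char) : ∀ (k s i : ℕ) (res : List (List Char)), l.length - s = k → i < s → s ≤ l.length →
    (∀ t (ht : t < l.length), i < t → t < s → l[t] = '.') →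
    (List.foldl (fdStepA l) ((i : Int), res) (PySem.List.pyRange (s : Int) (l.length : Int) 1)).2
      = res ++ fdSegA (l.getD i ' ') (decide (i = 0)) (s - i - 1) (l.drop s) := by
  intro k
  induction k with
  | zero =>
    intro s i res hk his hsl hdots
    rw [PySem.List.pyRange_one_eq_nil (by exact_mod_cast by omega : (l.length : Int) ≤ (s : Int))]
    have hs : s = l.length := by omega
    rw [hs, List.drop_length]
    simp [fdSegA]
  | succ k ih =>
    intro s i res hk his hsl hdots
    have hslt : s < l.length := by omega
    have hilt : i < l.length := by omega
    have hcons : PySem.List.pyRange (s : Int) (l.length : Int) 1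
        = (s : Int) :: PySem.List.pyRange ((s : Int) + 1) (l.length : Int) 1 :=
      PySem.List.pyRange_one_cons (by exact_mod_cast hslt)
    have hgetj : PySem.List.pyGetD l ((s : Int)) ' ' = l[s] := by
      rw [PySem.List.pyGetD_natCast]; exact List.getD_eq_getElem l ' ' hslt
    have hgeti : PySem.List.pyGetD l ((i : Int)) ' ' = l[i] := by
      rw [PySem.List.pyGetD_natCast]; exact List.getD_eq_getElem l ' ' hilt
    have hgetiD : l.getD i ' ' = l[i] := List.getD_eq_getElem l ' ' hilt
    have hdropcons : l.drop s = l[s] :: l.drop (s + 1) := List.drop_eq_getElem_cons hslt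
    have hcast : ((s + 1 : ℕ) : Int) = (s : Int) + 1 := by push_cast; ring
    rw [hcons, List.foldl_cons]
    by_cases hdot : l[s] = '.'
    · have hstep : fdStepA l ((i : Int), res) (s : Int) = ((i : Int), res) := by
        simp [fdStepA, hgetj, hdot]
      rw [hstep]
      have hrec := ih (s + 1) i res (by omega) (by omega) (by omega)
        (by
          intro t ht h1 h2
          by_cases hts : t = s
          · subst hts; exact hdot
          · exact hdots t ht h1 (by omega))
      rw [hcast] at hrec
      rw [hrec, hdropcons, hgetiD]
      have hseg : fdSegA l[i] (decide (i = 0)) (s - i - 1) (l[s] :: l.drop (s + 1))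
          = fdSegA l[i] (decide (i = 0)) (s - i - 1 + 1) (l.drop (s + 1)) := by
        simp [fdSegA, hdot]
      rw [hseg]
      have : s + 1 - i - 1 = s - i - 1 + 1 := by omega
      rw [this]
    · have hmid : (s : Int) - (i : Int) - 1 = ((s - i - 1 : ℕ) : Int) := by omega
      have hstep : fdStepA l ((i : Int), res) (s : Int)
          = ((s : Int), (if (i : Int) ≠ 0 then res ++ [[l[i]]] else res)
              ++ [fdFill l[i] l[s] (s - i - 1)]) := by
        simp only [fdStepA, hgetj, hgeti, if_neg hdot, hmid, Int.toNat_natCast,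
          fdFloordiv2_natCast, fdMod2_natCast]
        simp only [fdFill]
        split_ifs <;> rfl
      rw [hstep]
      have hrec := ih (s + 1) s
        ((if (i : Int) ≠ 0 then res ++ [[l[i]]] else res) ++ [fdFill l[i] l[s] (s - i - 1)])
        (by omega) (by omega) (by omega)
        (by intro t ht h1 h2; omega)
      rw [hcast] at hrec
      rw [hrec]
      have hgetsD : l.getD s ' ' = l[s] := List.getD_eq_getElem l ' ' hslt
      rw [hgetsD, decide_eq_false (by omega : ¬ s = 0)]
      have hzero : s + 1 - s - 1 = 0 := by omega
      rw [hzero, hdropcons, hgetiD]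
      have hseg : fdSegA l[i] (decide (i = 0)) (s - i - 1) (l[s] :: l.drop (s + 1))
          = (if decide (i = 0) then [] else [[l[i]]]) ++ [fdFill l[i] l[s] (s - i - 1)]
            ++ fdSegA l[s] false 0 (l.drop (s + 1)) := by
        simp [fdSegA, hdot]
      rw [hseg]
      by_cases hi : i = 0
      · subst hi; simp
      · have h1 : ((i : ℕ) : Int) ≠ 0 := by exact_mod_cast hi
        rw [if_pos h1, decide_eq_false hi]
        simp [List.append_assoc]

theorem fdJoin_nil : ∀ parts : List (List Char), PySem.Chars.join [] parts = parts.flatten := by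
  intro parts
  induction parts with
  | nil => simp [PySem.Chars.join_nil]
  | cons a t ih =>
    cases t with
    | nil => simp [PySem.Chars.join_singleton]
    | cons b r => rw [PySem.Chars.join_cons_cons]; simp_all

theorem fdMain : ∀ (N : ℕ) (xs : List Char) (p : Char), xs.length ≤ N → p ≠ '.' →
    List.zipWith fdCell (fdScanG fdStep (p, 0) xs) ((fdScanG fdStep ('R', 0) xs.reverse).reverse)
      = fdSegOut p 0 (xs ++ ['R']) := by
  intro N
  induction N with
  | zero =>
    intro xs p hN hp
    have hxs : xs = [] := List.eq_nil_of_length_eq_zero (Nat.le_zero.mp hN)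
    subst hxs
    show List.zipWith fdCell [] (([] : List (Char × Int)).reverse) = fdSegOut p 0 ([] ++ ['R'])
    simp only [List.reverse_nil, List.zipWith_nil_right, List.nil_append]
    simp [fdSegOut, fdFill]
  | succ N ihN =>
    intro xs p hN hp
    set m := (xs.takeWhile (fun c => c == '.')).length with hm
    have htw : xs.takeWhile (fun c => c == '.') = List.replicate m '.' := by
      apply List.eq_replicate_of_mem
      intro b hb
      have := List.mem_takeWhile_imp hb
      simpa using this
    have hsplit : xs = List.replicate m '.' ++ xs.dropWhile (fun c => c == '.') := by
      rw [← htw, List.takeWhile_append_dropWhile]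
    cases hrest : xs.dropWhile (fun c => c == '.') with
    | nil =>
      have hxs : xs = List.replicate m '.' := by rw [hsplit, hrest, List.append_nil]
      rw [hxs, List.reverse_replicate, fdSegOut_replicate]
      rw [show fdSegOut p (0 + m) ['R'] = fdFill p 'R' m from by simp [fdSegOut]]
      rw [fdScan_rep0, fdScan_rep_rev]
      exact fdCell_fill p 'R' m hp
    | cons c rest =>
      have hc' : (c == '.') = false := fdDropWhile_head _ xs c rest hrest
      have hcdot : c ≠ '.' := by simpa using hc'
      have hxs : xs = List.replicate m '.' ++ c :: rest := by rw [hsplit, hrest]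
      have hstep : ∀ st : Char × Int, fdStep st c = (c, 0) := fun st => by simp [fdStep, hcdot]
      have hF : fdScanG fdStep (p, 0) xs
          = (List.range m).map (fun t : ℕ => (p, (t : Int) + 1))
            ++ ((c, (0 : Int)) :: fdScanG fdStep (c, 0) rest) := by
        rw [hxs, fdScanG_append, fdScan_rep0]
        congr 1
        simp only [fdScanG, hstep]
      have hG : fdScanG fdStep ('R', 0) xs.reverse
          = fdScanG fdStep ('R', 0) rest.reverse
            ++ ((c, (0 : Int)) :: fdScanG fdStep (c, 0) (List.replicate m '.')) := by
        rw [hxs, List.reverse_append, List.reverse_cons, List.reverse_replicate, List.append_assoc,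
          List.singleton_append, fdScanG_append]
        congr 1
        simp only [fdScanG, hstep]
      rw [hF, hG, List.reverse_append, List.reverse_cons, List.append_assoc, List.singleton_append]
      rw [List.zipWith_append (h := by simp [fdScanG_length])]
      rw [List.zipWith_cons_cons]
      rw [fdScan_rep_rev, fdCell_fill p c m hp]
      rw [show fdCell (c, (0 : Int)) (c, (0 : Int)) = c from by simp [fdCell]]
      rw [ihN rest c (by rw [hxs] at hN; simp at hN; omega) hcdot]
      rw [hxs, List.append_assoc, List.cons_append, fdSegOut_replicate]
      rw [show fdSegOut p (0 + m) (c :: (rest ++ ['R']))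
          = fdFill p c m ++ [c] ++ fdSegOut c 0 (rest ++ ['R']) from by
        simp [fdSegOut, hcdot]]
      simp

-- ===== VERDICT =====
theorem fallingDominoes_spec : Claim_equal_fallingDominoes := by
  intro d _
  unfold Spec_fallingDominoes
  -- A's fold equals the segment recursion
  have hA : fallingDominoes d = String.ofList (fdSegOut 'L' 0 (d.toList ++ ['R'])) := by
    simp only [fallingDominoes]
    have hfold := fdA_fold ('L' :: d.toList ++ ['R']) (('L' :: d.toList ++ ['R']).length - 1) 1 0 []
      rfl (by omega) (by simp) (by intro t ht h1 h2; omega)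
    push_cast at hfold
    rw [hfold]
    have hlast : (d.toList ++ ['R']).getLast? = some 'R' := List.getLast?_concat ..
    have hflat := fdSegA_flatten (d.toList ++ ['R']) 'L' true 0 (by rw [hlast]; simp)
    have h1 : ('L' :: d.toList ++ ['R']).getD 0 ' ' = 'L' := rfl
    have h2 : List.drop 1 ('L' :: d.toList ++ ['R']) = d.toList ++ ['R'] := rfl
    simp only [List.nil_append, decide_true, h1, h2]
    rw [fdJoin_nil, hflat]
    simp
  -- B's three loops equal the two sweeps zipped cell by cell
  have hB : fallingDominoes_alt d
      = String.ofList (List.zipWith fdCell (fdScanG fdStep ('L', 0) d.toList)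
          ((fdScanG fdStep ('R', 0) d.toList.reverse).reverse)) := by
    have e1 : (d.toList.foldl (fun (st : (Char × Int) × List (Char × Int)) ch =>
          let pa := if ch ≠ '.' then (ch, (0 : Int)) else (st.1.1, st.1.2 + 1)
          (pa, st.2 ++ [pa])) ((('L', 0) : Char × Int), ([] : List (Char × Int)))).2
        = fdScanG fdStep ('L', 0) d.toList :=
      (congrArg Prod.snd (fdScanG_foldl fdStep d.toList ('L', 0) [])).trans (List.nil_append _)
    have e2 : (d.toList.reverse.foldl (fun (st : (Char × Int) × List (Char × Int)) ch =>
          let cb := if ch ≠ '.' then (ch, (0 : Int)) else (st.1.1, st.1.2 + 1)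
          (cb, st.2 ++ [cb])) ((('R', 0) : Char × Int), ([] : List (Char × Int)))).2
        = fdScanG fdStep ('R', 0) d.toList.reverse :=
      (congrArg Prod.snd (fdScanG_foldl fdStep d.toList.reverse ('R', 0) [])).trans (List.nil_append _)
    simp only [fallingDominoes_alt]
    rw [e1, e2]
    have e4 : (PySem.List.pyRange 0 ((d.toList.length : Int)) 1).foldl (fun (acc : List Char) k =>
          let pa := PySem.List.pyGetD (fdScanG fdStep ('L', 0) d.toList) k ('.', 0)
          let cb := PySem.List.pyGetD ((fdScanG fdStep ('R', 0) d.toList.reverse).reverse) k ('.', 0)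
          acc ++ [if pa.2 = 0 then pa.1
            else if pa.1 = cb.1 then pa.1
            else if pa.1 = 'L' ∧ cb.1 = 'R' then '.'
            else
              let m := pa.2 + cb.2 - 1
              let half := PySem.Int.floordiv m 2
              if pa.2 ≤ half then 'R' else if m - half < pa.2 then 'L' else '.']) []
        = [] ++ (PySem.List.pyRange 0 ((d.toList.length : Int)) 1).map
            (fun k => fdCell (PySem.List.pyGetD (fdScanG fdStep ('L', 0) d.toList) k ('.', 0))
              (PySem.List.pyGetD ((fdScanG fdStep ('R', 0) d.toList.reverse).reverse) k ('.', 0))) :=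
      fdFoldl_append_map _ _ _
    rw [e4, List.nil_append]
    rw [fdZip_map fdCell ('.', 0) ('.', 0) _ _ d.toList.length (fdScanG_length _ _ _)
      (by simp [fdScanG_length])]
  rw [hA, hB]
  rw [fdMain d.toList.length d.toList 'L' le_rfl (by decide)]
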